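-- pv_equiv track=rewrite | github.com/1van101/SoftUni-Fundamentals | python_fundamentals/more_exercises/03_list_basics_more_exercises/list_manipulator.py | get_min_even_or_odd
-- ===== SOURCE A (Python) =====
-- def get_min_even_or_odd(command, list):
--     if "even" in command:
--         even = [x for x in list if x % 2 == 0]
--         if len(even) == 0:
--             return f"No matches"
--         even_min = min(even)
--         for i in range(len(list) - 1, -1, -1):
--             if list[i] == even_min:
--                 return f"{i}"
--
--     else:
--         odd = [x for x in list if x % 2 != 0]
--         if len(odd) == 0:
--             return f"No matches"
--         odd_min = min(odd)
--         for i in range(len(list) - 1, -1, -1):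
--             if list[i] == odd_min:
--                 return f"{i}"
-- ===== SOURCE B (Python) =====
-- def get_min_even_or_odd(command, list):
--     want_even = "even" in command
--     best = None  # (min qualifying value so far, index of its LAST occurrence so far)
--     for i, x in enumerate(list):
--         if (x % 2 == 0) == want_even:
--             if best is None or x < best[0]:
--                 best = (x, i)
--             elif x == best[0]:
--                 best = (best[0], i)
--     if best is None:
--         return "No matches"
--     return f"{best[1]}"
-- ===== Notes on version B (the rewrite author's own statement) =====
-- stated objective: simpler
-- what changed: Replaces A's three passes (filter comprehension, min(), reverse index scan for the last occurrence) by one forward pass that tracks the minimum qualifying value and the index of its last occurrence.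
import Mathlib
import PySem

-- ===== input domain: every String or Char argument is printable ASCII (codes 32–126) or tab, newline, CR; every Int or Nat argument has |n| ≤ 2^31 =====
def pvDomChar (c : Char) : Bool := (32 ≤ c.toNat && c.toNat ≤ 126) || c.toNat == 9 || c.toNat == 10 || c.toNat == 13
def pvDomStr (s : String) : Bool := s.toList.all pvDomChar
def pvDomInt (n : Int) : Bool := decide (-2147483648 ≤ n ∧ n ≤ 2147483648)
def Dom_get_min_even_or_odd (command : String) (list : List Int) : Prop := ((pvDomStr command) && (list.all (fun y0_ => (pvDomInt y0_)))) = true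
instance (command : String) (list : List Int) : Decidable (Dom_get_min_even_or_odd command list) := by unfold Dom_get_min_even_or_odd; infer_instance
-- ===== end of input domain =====

-- B replaces A's three passes (filter, min(), reverse scan for the last index) by one forward
-- pass tracking the minimum qualifying value and the index of its last occurrence (objective: simpler).

-- ===== PORT A =====
-- 'for i in range(len(list)-1, -1, -1): if list[i] == m: return f"{i}"'
-- (pyGetD with default 0 is exact here: every index the range produces is in bounds)
def loopA (list : List Int) (m : Int) : List Int → Option String
  | [] => none
  | i :: rest => if PySem.List.pyGetD list i 0 == m then some (PySem.Int.toStr i) else loopA list m rest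

def get_min_even_or_odd (command : String) (list : List Int) : String :=
  if PySem.Str.isIn "even" command then
    let even := list.filter (fun x => PySem.Int.mod x 2 == 0)
    if even.length == 0 then "No matches"
    else
      match PySem.List.min? even (fun x => x) with
      | none => "No matches"   -- unreachable: even ≠ []
      | some even_min =>
        -- the scan always finds even_min, so the none case (Python: falls off, returns None) is unreachable
        (loopA list even_min (PySem.List.pyRange ((list.length : Int) - 1) (-1) (-1))).getD ""
  else
    let odd := list.filter (fun x => !(PySem.Int.mod x 2 == 0))
    if odd.length == 0 then "No matches"
    else
      match PySem.List.min? odd (fun x => x) with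
      | none => "No matches"   -- unreachable: odd ≠ []
      | some odd_min =>
        (loopA list odd_min (PySem.List.pyRange ((list.length : Int) - 1) (-1) (-1))).getD ""

-- ===== PORT B =====
def altStep (wantEven : Bool) (st : Option (Int × Int)) (p : Int × Int) : Option (Int × Int) :=
  if (PySem.Int.mod p.2 2 == 0) == wantEven then
    match st with
    | none => some (p.2, p.1)
    | some (m, _) =>
      if p.2 < m then some (p.2, p.1)
      else if p.2 == m then some (m, p.1)
      else st
  else st

def get_min_even_or_odd_alt (command : String) (list : List Int) : String :=
  let wantEven := PySem.Str.isIn "even" command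
  match (PySem.List.enumerate list).foldl (altStep wantEven) none with
  | none => "No matches"
  | some best => PySem.Int.toStr best.2

-- ===== PRECONDITION & SPEC =====
def Spec_get_min_even_or_odd (command : String) (list : List Int) (out : String) : Prop := out = get_min_even_or_odd_alt command list
instance (command : String) (list : List Int) (out : String) : Decidable (Spec_get_min_even_or_odd command list out) := by unfold Spec_get_min_even_or_odd; infer_instance

-- ===== CLAIM (what is proved, stated in full; the proofs are below) =====
def Claim_equal_get_min_even_or_odd : Prop := ∀ (command : String) (list : List Int), Dom_get_min_even_or_odd command list → Spec_get_min_even_or_odd command list (get_min_even_or_odd command list)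

-- ===== LEMMAS AND PROOFS =====

-- index of the LAST occurrence of m in l
def lastIdx? (m : Int) : List Int → Option Nat
  | [] => none
  | x :: xs =>
    match lastIdx? m xs with
    | some i => some (i + 1)
    | none => if x = m then some 0 else none

theorem lastIdx?_eq_none_iff (m : Int) (l : List Int) : lastIdx? m l = none ↔ m ∉ l := by
  induction l with
  | nil => simp [lastIdx?]
  | cons x xs ih =>
    simp only [lastIdx?, List.mem_cons]
    cases h : lastIdx? m xs with
    | some i => simp_all
    | none =>
      have := ih.mp h
      by_cases hx : x = m <;> simp_all [eq_comm]

theorem lastIdx?_append_singleton (m x : Int) (l : List Int) :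
    lastIdx? m (l ++ [x]) = if x = m then some l.length else lastIdx? m l := by
  induction l with
  | nil => simp [lastIdx?]
  | cons y ys ih =>
    simp only [List.cons_append, lastIdx?, ih, List.length_cons]
    by_cases hx : x = m <;> simp [hx]

theorem loopA_append_irrelevant (l : List Int) (x m : Int) (r : List Int)
    (hr : ∀ i ∈ r, 0 ≤ i ∧ i < (l.length : Int)) :
    loopA (l ++ [x]) m r = loopA l m r := by
  induction r with
  | nil => rfl
  | cons i rest ih =>
    have hi := hr i (by simp)
    have hget : PySem.List.pyGetD (l ++ [x]) i 0 = PySem.List.pyGetD l i 0 := by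
      rw [PySem.List.pyGetD_of_nonneg _ _ hi.1, PySem.List.pyGetD_of_nonneg _ _ hi.1]
      have hlt : i.toNat < l.length := by omega
      simp [List.getD, List.getElem?_append_left hlt]
    simp only [loopA, hget]
    split
    · rfl
    · exact ih (fun j hj => hr j (by simp [hj]))

theorem loopA_spec (m : Int) (l : List Int) :
    loopA l m (PySem.List.pyRange ((l.length : Int) - 1) (-1) (-1)) =
      (lastIdx? m l).map (fun k => PySem.Int.toStr (k : Int)) := by
  induction l using List.reverseRecOn with
  | nil =>
    rw [PySem.List.pyRange_neg_one_eq_nil (by norm_num)]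
    simp [loopA, lastIdx?]
  | append_singleton l x ih =>
    have hlen : ((l ++ [x]).length : Int) - 1 = (l.length : Int) := by simp
    rw [hlen, PySem.List.pyRange_neg_one_cons (by omega)]
    have hget : PySem.List.pyGetD (l ++ [x]) (l.length : Int) 0 = x := by
      rw [PySem.List.pyGetD_of_nonneg _ _ (by positivity)]
      simp [List.getD]
    simp only [loopA, hget, lastIdx?_append_singleton]
    by_cases hx : x = m
    · simp [hx]
    · have hxm : (x == m) = false := by simp [hx]
      simp only [hxm, Bool.false_eq_true, if_false, if_neg hx]
      rw [loopA_append_irrelevant l x m _ (fun i hi => by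
        have := (PySem.List.mem_pyRange_neg_one).mp hi
        omega)]
      exact ih

-- min(s ++ [x]) in terms of min(s)
theorem min?_id_append_singleton (s : List Int) (x : Int) :
    PySem.List.min? (s ++ [x]) (fun y => y) =
      some (match PySem.List.min? s (fun y => y) with | none => x | some m => min m x) := by
  cases s with
  | nil =>
    rw [show PySem.List.min? ([] : List Int) (fun y => y) = none from
      (PySem.List.min?_eq_none_iff _ _).mpr rfl]
    simp [PySem.List.min?_id_cons]
  | cons y t =>
    rw [List.cons_append, PySem.List.min?_id_cons, PySem.List.min?_id_cons]
    simp [List.foldl_append]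

-- what B's fold computes
theorem foldB_spec (w : Bool) (l : List Int) :
    (PySem.List.enumerate l).foldl (altStep w) none =
      (match PySem.List.min? (l.filter (fun x => (PySem.Int.mod x 2 == 0) == w)) (fun y => y) with
       | none => none
       | some m => some (m, ((lastIdx? m l).getD 0 : Int))) := by
  induction l using List.reverseRecOn with
  | nil => simp [PySem.List.enumerate, PySem.List.min?]
  | append_singleton l x ih =>
    rw [PySem.List.enumerate_append, List.foldl_append, ih]
    simp only [PySem.List.enumerate_cons, PySem.List.enumerate_nil, List.foldl_cons, List.foldl_nil,
      List.filter_append]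
    by_cases hq : ((PySem.Int.mod x 2 == 0) == w) = true
    · -- x qualifies
      have hq2 : (x % 2 == 0) = w := by
        rwa [PySem.Int.mod_eq_emod_of_pos (by norm_num : (0:Int) < 2), beq_iff_eq] at hq
      have hfil : List.filter (fun x => (PySem.Int.mod x 2 == 0) == w) [x] = [x] := by
        rw [List.filter_singleton, hq]; rfl
      rw [hfil, min?_id_append_singleton]
      cases hmin : PySem.List.min? (l.filter (fun x => (PySem.Int.mod x 2 == 0) == w)) (fun y => y) with
      | none =>
        have hnil := (PySem.List.min?_eq_none_iff _ _).mp hmin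
        have hxl : x ∉ l := fun hx => by
          have hmem : x ∈ l.filter (fun x => (PySem.Int.mod x 2 == 0) == w) := by
            rw [List.mem_filter]; exact ⟨hx, hq⟩
          rw [hnil] at hmem
          exact absurd hmem (by simp)
        have hlast : lastIdx? x (l ++ [x]) = some l.length := by
          rw [lastIdx?_append_singleton]; simp
        simp [altStep, hq2, hlast]
      | some m =>
        have hm : m ∈ l := by
          have := PySem.List.min?_mem hmin
          exact (List.mem_filter.mp this).1
        simp only [altStep, hq, if_true]
        by_cases hlt : x < m
        · have hminx : min m x = x := by omega
          rw [hminx]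
          have hlast : lastIdx? x (l ++ [x]) = some l.length := by
            rw [lastIdx?_append_singleton]; simp
          simp [hlt, hlast]
        · have hmin' : min m x = m := by omega
          rw [hmin']
          by_cases hxm : x = m
          · subst hxm
            have hlast : lastIdx? x (l ++ [x]) = some l.length := by
              rw [lastIdx?_append_singleton]; simp
            simp [hlast]
          · have hlast : lastIdx? m (l ++ [x]) = lastIdx? m l := by
              rw [lastIdx?_append_singleton]; simp [hxm]
            have hxm' : (x == m) = false := by simp [hxm]
            simp [hlt, hxm', hlast]
    · -- x does not qualify
      have hq' : ((PySem.Int.mod x 2 == 0) == w) = false := Bool.eq_false_iff.mpr hq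
      have hfil : List.filter (fun x => (PySem.Int.mod x 2 == 0) == w) [x] = [] := by
        rw [List.filter_singleton, hq']; rfl
      rw [hfil, List.append_nil]
      cases hmin : PySem.List.min? (l.filter (fun x => (PySem.Int.mod x 2 == 0) == w)) (fun y => y) with
      | none =>
        have hq2 : ((x % 2 == 0) == w) = false := by
          rwa [PySem.Int.mod_eq_emod_of_pos (by norm_num : (0:Int) < 2)] at hq'
        simp [altStep, hq2]
      | some m =>
        have hmq : ((PySem.Int.mod m 2 == 0) == w) = true := by
          have := PySem.List.min?_mem hmin
          exact (List.mem_filter.mp this).2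
        have hxm : x ≠ m := fun h => hq (h ▸ hmq)
        have hq2 : ((x % 2 == 0) == w) = false := by
          rwa [PySem.Int.mod_eq_emod_of_pos (by norm_num : (0:Int) < 2)] at hq'
        have hlast : lastIdx? m (l ++ [x]) = lastIdx? m l := by
          rw [lastIdx?_append_singleton]; simp [hxm]
        simp [altStep, hq2, hlast]

-- one branch of A equals B's fold result, for either parity
theorem branch_eq (w : Bool) (l : List Int) :
    (if (l.filter (fun x => (PySem.Int.mod x 2 == 0) == w)).length == 0 then "No matches"
     else
       match PySem.List.min? (l.filter (fun x => (PySem.Int.mod x 2 == 0) == w)) (fun y => y) with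
       | none => "No matches"
       | some m => (loopA l m (PySem.List.pyRange ((l.length : Int) - 1) (-1) (-1))).getD "") =
    (match (PySem.List.enumerate l).foldl (altStep w) none with
     | none => "No matches"
     | some best => PySem.Int.toStr best.2) := by
  rw [foldB_spec]
  cases hmin : PySem.List.min? (l.filter (fun x => (PySem.Int.mod x 2 == 0) == w)) (fun y => y) with
  | none =>
    have hnil := (PySem.List.min?_eq_none_iff _ _).mp hmin
    simp
  | some m =>
    have hne : l.filter (fun x => (PySem.Int.mod x 2 == 0) == w) ≠ [] := by
      intro h; rw [h] at hmin; simp [PySem.List.min?] at hmin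
    have hlen : ((l.filter (fun x => (PySem.Int.mod x 2 == 0) == w)).length == 0) = false := by
      rw [beq_eq_false_iff_ne]
      exact fun h => hne (List.length_eq_zero_iff.mp h)
    have hm : m ∈ l := by
      have := PySem.List.min?_mem hmin
      exact (List.mem_filter.mp this).1
    obtain ⟨k, hk⟩ : ∃ k, lastIdx? m l = some k := by
      cases h : lastIdx? m l with
      | none => exact absurd ((lastIdx?_eq_none_iff m l).mp h) (by simp [hm])
      | some k => exact ⟨k, rfl⟩
    rw [hlen]
    simp only [Bool.false_eq_true, if_false, loopA_spec, hk]
    rfl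

-- ===== VERDICT (by name: the statement is the Claim_ definition above) =====
theorem get_min_even_or_odd_spec : Claim_equal_get_min_even_or_odd := by
  intro command list _
  unfold Spec_get_min_even_or_odd get_min_even_or_odd get_min_even_or_odd_alt
  by_cases h : PySem.Str.isIn "even" command = true
  · simp only [h, if_true]
    have := branch_eq true list
    simpa using this
  · have h' : PySem.Str.isIn "even" command = false := by simp_all
    simp only [h', Bool.false_eq_true, if_false]
    have := branch_eq false list
    simpa using this
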